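-- pv_equiv track=rewrite | github.com/Neogul02/py | 과외/py_work/메뉴함수.py | grade_2
-- ===== SOURCE A (Python) =====
-- def grade_2(new_list):
--
--     grade = [ ]
--     for jumsoo in new_list:
--             if  jumsoo >= 90:
--                 grade.append("A")
--             elif jumsoo >=80:
--                 grade.append("B")
--             elif jumsoo >=70:
--                 grade.append("C")
--             elif jumsoo >=60:
--                 grade.append("D")
--             else :
--                 grade.append("F")
--     return grade
-- ===== SOURCE B (Python) =====
-- import bisect
--
-- _BOUNDARIES = [60, 70, 80, 90]
-- _LETTERS = ["F", "D", "C", "B", "A"]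
--
-- def grade_2(new_list):
--     return [_LETTERS[bisect.bisect_right(_BOUNDARIES, jumsoo)] for jumsoo in new_list]
-- ===== Notes on version B (the rewrite author's own statement) =====
-- stated objective: idiomatic
-- what changed: Replaces the if-elif comparison cascade with a threshold table indexed via bisect_right, mapping each score to its letter by table lookup instead of branching.
import Mathlib
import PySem

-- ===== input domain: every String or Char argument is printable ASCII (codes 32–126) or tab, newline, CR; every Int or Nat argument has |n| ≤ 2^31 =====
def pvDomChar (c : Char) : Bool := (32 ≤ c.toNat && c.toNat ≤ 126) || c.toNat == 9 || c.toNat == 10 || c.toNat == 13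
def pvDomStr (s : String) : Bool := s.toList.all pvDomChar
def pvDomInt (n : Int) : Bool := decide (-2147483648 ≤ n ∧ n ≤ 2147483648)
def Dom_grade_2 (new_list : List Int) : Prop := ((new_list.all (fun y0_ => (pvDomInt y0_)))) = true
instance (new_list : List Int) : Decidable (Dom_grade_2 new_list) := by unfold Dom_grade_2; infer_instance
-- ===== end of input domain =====

-- B replaces A's if-elif cascade with a threshold table indexed by bisect_right (idiomatic; same O(n) cost).


-- ===== PORT A =====
-- literal transliteration of A: fold over the list appending the branch result
def grade_2 (new_list : List Int) : List String :=
  new_list.foldl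
    (fun grade jumsoo =>
      if jumsoo ≥ 90 then grade ++ ["A"]
      else if jumsoo ≥ 80 then grade ++ ["B"]
      else if jumsoo ≥ 70 then grade ++ ["C"]
      else if jumsoo ≥ 60 then grade ++ ["D"]
      else grade ++ ["F"]) []

-- ===== PORT B =====
-- bisect.bisect_right on a sorted list = number of elements ≤ x (the library call's contract)
def bisectRight (xs : List Int) (x : Int) : Nat := xs.countP (fun b => b ≤ x)

def pvBoundaries : List Int := [60, 70, 80, 90]
def pvLetters : List String := ["F", "D", "C", "B", "A"]

def grade_2_alt (new_list : List Int) : List String :=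
  new_list.map (fun jumsoo => pvLetters.getD (bisectRight pvBoundaries jumsoo) "")

-- ===== PRECONDITION & SPEC =====
def Spec_grade_2 (new_list : List Int) (out : List String) : Prop := out = grade_2_alt new_list
instance (new_list : List Int) (out : List String) : Decidable (Spec_grade_2 new_list out) := by unfold Spec_grade_2; infer_instance

-- ===== CLAIM (what is proved, stated in full; the proofs are below) =====
def Claim_equal_grade_2 : Prop := ∀ (new_list : List Int), Dom_grade_2 new_list → Spec_grade_2 new_list (grade_2 new_list)

-- ===== LEMMAS AND PROOFS =====
-- pointwise agreement of the branch cascade with the table lookup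
theorem grade_2_point (j : Int) :
    (if j ≥ 90 then "A"
     else if j ≥ 80 then "B"
     else if j ≥ 70 then "C"
     else if j ≥ 60 then "D"
     else "F") = pvLetters.getD (bisectRight pvBoundaries j) "" := by
  simp only [bisectRight, pvBoundaries, pvLetters, List.countP_cons, List.countP_nil]
  split_ifs <;> simp_all <;> omega

theorem grade_2_fold (new_list : List Int) (acc : List String) :
    new_list.foldl
      (fun grade jumsoo =>
        if jumsoo ≥ 90 then grade ++ ["A"]
        else if jumsoo ≥ 80 then grade ++ ["B"]
        else if jumsoo ≥ 70 then grade ++ ["C"]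
        else if jumsoo ≥ 60 then grade ++ ["D"]
        else grade ++ ["F"]) acc
      = acc ++ new_list.map (fun jumsoo => pvLetters.getD (bisectRight pvBoundaries jumsoo) "") := by
  induction new_list generalizing acc with
  | nil => simp
  | cons j rest ih =>
    simp only [List.foldl_cons, List.map_cons, ← grade_2_point j]
    split_ifs <;> simp [ih]

-- ===== VERDICT (by name: the statement is the Claim_ definition above) =====
theorem grade_2_spec : Claim_equal_grade_2 := by
  intro new_list _
  unfold Spec_grade_2 grade_2 grade_2_alt
  simpa using grade_2_fold new_list []
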